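-- pv_equiv track=rewrite | github.com/JesseWebDotCom/loki-doki | app/skills/local_runtime.py | _search_result_title
-- ===== SOURCE A (Python) =====
-- def _capture_line(block: str, prefix: str) -> str:
--     """Extract one prefixed line from a formatted search block."""
--     for line in block.splitlines():
--         if line.startswith(prefix):
--             return line.removeprefix(prefix).strip()
--     return ""
--
-- def _search_result_title(block: str) -> str:
--     """Extract a result title from either legacy or current search formatting."""
--     title = _capture_line(block, "Title:")
--     if title:
--         return title
--     for line in block.splitlines():
--         cleaned = line.strip()
--         if cleaned.startswith("Source [") and "]:" in cleaned:
--             return cleaned.split("]:", 1)[1].strip()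
--     return ""
-- ===== SOURCE B (Python) =====
-- def _search_result_title(block: str) -> str:
--     """Extract a result title from either legacy or current search formatting."""
--     title = None
--     source = None
--     for line in block.splitlines():
--         if title is None and line.startswith("Title:"):
--             title = line[len("Title:"):].strip()
--         stripped = line.strip()
--         if source is None and stripped.startswith("Source [") and "]:" in stripped:
--             source = stripped.split("]:", 1)[1].strip()
--     if title:
--         return title
--     return source if source is not None else ""
-- ===== Notes on version B (the rewrite author's own statement) =====
-- stated objective: alternative
-- what changed: Replaces the helper-based Title scan plus a second full re-scan for Source lines with one single pass over the lines that latches the first Title remainder and the first Source extraction, deciding Title-over-Source priority after the loop.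
import Mathlib
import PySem

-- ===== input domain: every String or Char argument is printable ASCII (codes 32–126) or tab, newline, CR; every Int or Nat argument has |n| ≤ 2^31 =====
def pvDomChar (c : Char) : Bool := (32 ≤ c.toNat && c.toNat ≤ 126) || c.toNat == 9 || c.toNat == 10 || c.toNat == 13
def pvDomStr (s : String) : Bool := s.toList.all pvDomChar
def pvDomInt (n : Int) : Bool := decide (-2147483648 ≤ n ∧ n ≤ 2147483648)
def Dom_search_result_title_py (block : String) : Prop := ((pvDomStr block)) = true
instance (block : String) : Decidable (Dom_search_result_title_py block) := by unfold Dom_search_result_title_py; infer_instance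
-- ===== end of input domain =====

-- B merges A's helper-based Title scan and its second Source re-scan into one pass that
-- latches both candidates and decides priority after the loop (alternative decomposition, same cost).

-- ===== PORT A =====
-- cleaned.split("]:", 1)[1].strip() — the "]:" guard holds at every call site, so index 1 exists
def pvExtractSource (cleaned : String) : String :=
  PySem.Str.strip (((PySem.Str.splitMax? cleaned "]:" 1).getD []).getD 1 "")

-- _capture_line: line.removeprefix(prefix) is evaluated only under the startswith guard,
-- where it equals dropping prefix-many characters (exact there)
def pvCaptureLine (lines : List String) (pre : String) : String :=
  match lines with
  | [] => ""
  | l :: rest =>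
      if PySem.Str.startswith l pre then
        PySem.Str.strip (String.ofList (l.toList.drop pre.toList.length))
      else pvCaptureLine rest pre

-- A's second loop over the lines
def pvSourceLoop (lines : List String) : String :=
  match lines with
  | [] => ""
  | l :: rest =>
      let cleaned := PySem.Str.strip l
      if PySem.Str.startswith cleaned "Source [" && PySem.Str.isIn "]:" cleaned then
        pvExtractSource cleaned
      else pvSourceLoop rest

def search_result_title_py (block : String) : String :=
  let title := pvCaptureLine (PySem.Str.splitlines block) "Title:"
  if title ≠ "" then title
  else pvSourceLoop (PySem.Str.splitlines block)

-- ===== PORT B =====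
-- single pass: latch first Title remainder and first Source extraction
-- (line[len("Title:"):] under the startswith guard = drop 6 characters, exact)
def pvScan (lines : List String) (t s : Option String) : Option String × Option String :=
  match lines with
  | [] => (t, s)
  | l :: rest =>
      let t' := if t.isNone && PySem.Str.startswith l "Title:" then
                  some (PySem.Str.strip (String.ofList (l.toList.drop 6)))
                else t
      let stripped := PySem.Str.strip l
      let s' := if s.isNone && (PySem.Str.startswith stripped "Source [" && PySem.Str.isIn "]:" stripped) then
                  some (pvExtractSource stripped)
                else s
      pvScan rest t' s'

def search_result_title_py_alt (block : String) : String :=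
  let r := pvScan (PySem.Str.splitlines block) none none
  if r.1.getD "" ≠ "" then r.1.getD ""
  else r.2.getD ""

-- ===== PRECONDITION & SPEC =====
def Spec_search_result_title_py (block : String) (out : String) : Prop := out = search_result_title_py_alt block
instance (block : String) (out : String) : Decidable (Spec_search_result_title_py block out) := by unfold Spec_search_result_title_py; infer_instance

-- ===== CLAIM (what is proved, stated in full; the proofs are below) =====
def Claim_equal_search_result_title_py : Prop := ∀ (block : String), Dom_search_result_title_py block → Spec_search_result_title_py block (search_result_title_py block)

-- ===== LEMMAS AND PROOFS =====

theorem pvScan_fst_some (lines : List String) (x : String) (s : Option String) :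
    (pvScan lines (some x) s).1 = some x := by
  induction lines generalizing s with
  | nil => rfl
  | cons l rest ih => simp only [pvScan, Option.isNone_some, Bool.false_and]; exact ih _

theorem pvScan_snd_some (lines : List String) (x : String) (t : Option String) :
    (pvScan lines t (some x)).2 = some x := by
  induction lines generalizing t with
  | nil => rfl
  | cons l rest ih => simp only [pvScan, Option.isNone_some, Bool.false_and]; exact ih _

theorem pvScan_fst_none (lines : List String) (s : Option String) :
    (pvScan lines none s).1.getD "" = pvCaptureLine lines "Title:" := by
  induction lines generalizing s with
  | nil => rfl
  | cons l rest ih =>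
      by_cases h : PySem.Chars.startswith l.toList ['T', 'i', 't', 'l', 'e', ':'] = true
      · simp [pvScan, pvCaptureLine, h, pvScan_fst_some]
      · simp only [Bool.not_eq_true] at h
        simp [pvScan, pvCaptureLine, h, ih]

theorem pvScan_snd_none (lines : List String) (t : Option String) :
    (pvScan lines t none).2.getD "" = pvSourceLoop lines := by
  induction lines generalizing t with
  | nil => rfl
  | cons l rest ih =>
      by_cases h : PySem.Chars.startswith (PySem.Chars.strip l.toList) ['S', 'o', 'u', 'r', 'c', 'e', ' ', '['] = true ∧ PySem.Chars.isIn [']', ':'] (PySem.Chars.strip l.toList) = true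
      · simp [pvScan, pvSourceLoop, h, pvScan_snd_some]
      · simp [pvScan, pvSourceLoop, h, ih]

-- ===== VERDICT (by name: the statement is the Claim_ definition above) =====
theorem search_result_title_py_spec : Claim_equal_search_result_title_py := by
  intro block _
  unfold Spec_search_result_title_py search_result_title_py search_result_title_py_alt
  simp only [pvScan_fst_none, pvScan_snd_none]
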